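-- pv_equiv track=rewrite | github.com/ryanod2014/enigma | second_vowel_analysis.py | second_vowel_position
-- ===== SOURCE A (Python) =====
-- VOWELS = set('aeiouAEIOU')
--
-- def second_vowel_position(word: str) -> int:
--     """Return the 1-indexed position of the 2nd vowel in `word`. If <2 vowels, return -1."""
--     count = 0
--     for idx, ch in enumerate(word, 1):  # 1-indexed
--         if ch in VOWELS:
--             count += 1
--             if count == 2:
--                 return idx
--     return -1  # Less than 2 vowels
-- ===== SOURCE B (Python) =====
-- VOWELS = 'aeiouAEIOU'
--
-- def _next_vowel(word, start):
--     """Smallest index >= start holding any vowel, via one str.find per vowel; -1 if none."""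
--     hits = [p for v in VOWELS if (p := word.find(v, start)) != -1]
--     return min(hits) if hits else -1
--
-- def second_vowel_position(word: str) -> int:
--     """Return the 1-indexed position of the 2nd vowel in `word`. If <2 vowels, return -1."""
--     first = _next_vowel(word, 0)
--     if first == -1:
--         return -1
--     second = _next_vowel(word, first + 1)
--     return second + 1 if second != -1 else -1
-- ===== Notes on version B (the rewrite author's own statement) =====
-- stated objective: alternative
-- what changed: Instead of A's single character-by-character scan with a running vowel counter, B never iterates over characters itself: it delegates to str.find, taking the minimum of the ten per-vowel find(v, start) results to locate the first vowel and then again from first+1 to locate the second.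
import Mathlib
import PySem

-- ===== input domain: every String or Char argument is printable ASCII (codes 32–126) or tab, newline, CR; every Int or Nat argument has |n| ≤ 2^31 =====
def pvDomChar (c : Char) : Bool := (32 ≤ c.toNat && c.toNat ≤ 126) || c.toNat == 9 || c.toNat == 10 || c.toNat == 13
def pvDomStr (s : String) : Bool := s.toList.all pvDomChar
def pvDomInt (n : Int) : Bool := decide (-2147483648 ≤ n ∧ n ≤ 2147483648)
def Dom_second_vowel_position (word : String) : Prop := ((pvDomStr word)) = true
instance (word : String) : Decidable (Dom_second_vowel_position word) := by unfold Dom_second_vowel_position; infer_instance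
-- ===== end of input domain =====

-- B replaces A's counting scan by two stages of str.find: the minimum of the ten per-vowel
-- find(v, start) results gives the next vowel position; done from 0 and then from first+1.

def pvVowel (c : Char) : Bool := "aeiouAEIOU".toList.contains c

-- ===== PORT A =====
-- A's loop: enumerate(word, 1) with a running count, returning idx when count hits 2
def pvALoop : List Char → Int → Nat → Int
  | [], _, _ => -1
  | c :: rest, idx, count =>
    if pvVowel c then
      if count + 1 == 2 then idx
      else pvALoop rest (idx + 1) (count + 1)
    else pvALoop rest (idx + 1) count

def second_vowel_position (word : String) : Int := pvALoop word.toList 1 0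

-- ===== PORT B =====
-- word.find(v, start): first index ≥ start where v occurs, else -1 (exact for start ≥ 0,
-- the only way B calls it)
def pvFindFrom : List Char → Char → Int → Int → Int
  | [], _, _, _ => -1
  | c :: cs, v, start, i => if start ≤ i ∧ c = v then i else pvFindFrom cs v start (i + 1)

-- hits = [p for v in VOWELS if (p := word.find(v, start)) != -1]
def pvHits (cs : List Char) (start : Int) : List Int :=
  "aeiouAEIOU".toList.filterMap
    (fun v => let p := pvFindFrom cs v start 0; if p ≠ -1 then some p else none)

-- min(hits) if hits else -1
def pvNextVowel (cs : List Char) (start : Int) : Int :=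
  match (pvHits cs start).min? with
  | some m => m
  | none => -1

def second_vowel_position_alt (word : String) : Int :=
  let first := pvNextVowel word.toList 0
  if first == -1 then -1
  else
    let second := pvNextVowel word.toList (first + 1)
    if second != -1 then second + 1 else -1

-- ===== PRECONDITION & SPEC =====
def Spec_second_vowel_position (word : String) (out : Int) : Prop := out = second_vowel_position_alt word
instance (word : String) (out : Int) : Decidable (Spec_second_vowel_position word out) := by unfold Spec_second_vowel_position; infer_instance

-- ===== CLAIM (what is proved, stated in full; the proofs are below) =====
def Claim_equal_second_vowel_position : Prop := ∀ (word : String), Dom_second_vowel_position word → Spec_second_vowel_position word (second_vowel_position word)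

-- ===== LEMMAS AND PROOFS =====

-- reference scan: first index i' ≥ start (counting from offset i) holding a vowel, else -1
def pvScan : List Char → Int → Int → Int
  | [], _, _ => -1
  | c :: cs, start, i => if start ≤ i ∧ pvVowel c then i else pvScan cs start (i + 1)

-- 1-indexed-from-k list of vowel positions
def pvPositions (cs : List Char) (k : Int) : List Int :=
  (PySem.List.enumerate cs k).filterMap (fun p => if pvVowel p.2 then some p.1 else none)

theorem pvPositions_cons (c : Char) (cs : List Char) (k : Int) :
    pvPositions (c :: cs) k =
      if pvVowel c then k :: pvPositions cs (k + 1) else pvPositions cs (k + 1) := by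
  by_cases h : pvVowel c <;>
    simp [pvPositions, PySem.List.enumerate_cons, h]

theorem pvALoop_one (cs : List Char) (k : Int) :
    pvALoop cs k 1 = match pvPositions cs k with
      | p :: _ => p
      | [] => -1 := by
  induction cs generalizing k with
  | nil => simp [pvALoop, pvPositions]
  | cons c cs ih =>
    rw [pvPositions_cons]
    by_cases h : pvVowel c <;> simp [pvALoop, h, ih]

theorem pvALoop_zero (cs : List Char) (k : Int) :
    pvALoop cs k 0 = match pvPositions cs k with
      | _ :: p :: _ => p
      | _ => -1 := by
  induction cs generalizing k with
  | nil => simp [pvALoop, pvPositions]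
  | cons c cs ih =>
    rw [pvPositions_cons]
    by_cases h : pvVowel c
    · simp [pvALoop, h, pvALoop_one]
      cases pvPositions cs (k + 1) <;> simp
    · simp [pvALoop, h, ih]

theorem pvFindFrom_lb (cs : List Char) (v : Char) (start i : Int) (hi : 0 ≤ i) :
    pvFindFrom cs v start i = -1 ∨ i ≤ pvFindFrom cs v start i := by
  induction cs generalizing i with
  | nil => left; rfl
  | cons c cs ih =>
    simp only [pvFindFrom]
    split
    · right; exact le_refl i
    · rcases ih (i + 1) (by omega) with h | h
      · left; exact h
      · right; omega

theorem pvScan_lb (cs : List Char) (start i : Int) (hi : 0 ≤ i) :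
    pvScan cs start i = -1 ∨ i ≤ pvScan cs start i := by
  induction cs generalizing i with
  | nil => left; rfl
  | cons c cs ih =>
    simp only [pvScan]
    split
    · right; exact le_refl i
    · rcases ih (i + 1) (by omega) with h | h
      · left; exact h
      · right; omega

-- a successful find of a vowel bounds the scan from above (and makes it succeed)
theorem pvFind_to_scan (cs : List Char) (v : Char) (start i : Int) (hi : 0 ≤ i)
    (hv : pvVowel v = true) (hne : pvFindFrom cs v start i ≠ -1) :
    pvScan cs start i ≠ -1 ∧ pvScan cs start i ≤ pvFindFrom cs v start i := by
  induction cs generalizing i with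
  | nil => exact absurd rfl hne
  | cons c cs ih =>
    simp only [pvFindFrom] at hne ⊢
    simp only [pvScan]
    by_cases hc : start ≤ i ∧ c = v
    · rw [if_pos hc, if_pos ⟨hc.1, hc.2 ▸ hv⟩]
      exact ⟨by omega, le_refl i⟩
    · rw [if_neg hc] at hne ⊢
      have h' := ih (i + 1) (by omega) hne
      split
      · refine ⟨by omega, ?_⟩
        rcases pvFindFrom_lb cs v start (i + 1) (by omega) with h | h
        · exact absurd h hne
        · omega
      · exact h'

-- a successful scan is witnessed by a successful find of some vowel, at most as large
theorem pvScan_to_find (cs : List Char) (start i : Int) (hi : 0 ≤ i)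
    (hne : pvScan cs start i ≠ -1) :
    ∃ v, pvVowel v = true ∧ pvFindFrom cs v start i ≠ -1 ∧
      pvFindFrom cs v start i ≤ pvScan cs start i := by
  induction cs generalizing i with
  | nil => exact absurd rfl hne
  | cons c cs ih =>
    simp only [pvScan] at hne ⊢
    by_cases hc : start ≤ i ∧ pvVowel c = true
    · refine ⟨c, hc.2, ?_⟩
      rw [if_pos hc]
      have hf : pvFindFrom (c :: cs) c start i = i := by
        simp [pvFindFrom, hc.1]
      rw [hf]
      exact ⟨by omega, le_refl i⟩
    · rw [if_neg hc] at hne ⊢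
      obtain ⟨v, hv, hf, hle⟩ := ih (i + 1) (by omega) hne
      refine ⟨v, hv, ?_⟩
      simp only [pvFindFrom]
      by_cases hcv : start ≤ i ∧ c = v
      · rw [if_pos hcv]
        rcases pvScan_lb cs start (i + 1) (by omega) with h | h
        · exact absurd h hne
        · exact ⟨by omega, by omega⟩
      · rw [if_neg hcv]
        exact ⟨hf, hle⟩

theorem pvVowel_iff_mem (v : Char) : pvVowel v = true ↔ v ∈ "aeiouAEIOU".toList := by
  simp [pvVowel]

theorem pvNextVowel_eq_scan (cs : List Char) (start : Int) :
    pvNextVowel cs start = pvScan cs start 0 := by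
  by_cases h : pvScan cs start 0 = -1
  · have hnil : pvHits cs start = [] := by
      rw [List.eq_nil_iff_forall_not_mem]
      intro x hx
      obtain ⟨v, hv, hfx⟩ := List.mem_filterMap.mp hx
      simp only at hfx
      split at hfx
      · exact (pvFind_to_scan cs v start 0 le_rfl
          ((pvVowel_iff_mem v).mpr hv) (by assumption)).1 h
      · simp at hfx
    simp [pvNextVowel, hnil, h]
  · obtain ⟨v, hv, hf, hle⟩ := pvScan_to_find cs start 0 le_rfl h
    have hge := (pvFind_to_scan cs v start 0 le_rfl hv hf).2
    have heq : pvFindFrom cs v start 0 = pvScan cs start 0 := le_antisymm hle hge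
    have hmem : pvScan cs start 0 ∈ pvHits cs start := by
      apply List.mem_filterMap.mpr
      exact ⟨v, (pvVowel_iff_mem v).mp hv, by simp only; rw [if_pos hf, heq]⟩
    have hbound : ∀ x ∈ pvHits cs start, pvScan cs start 0 ≤ x := by
      intro x hx
      obtain ⟨u, hu, hfx⟩ := List.mem_filterMap.mp hx
      simp only at hfx
      split at hfx
      · cases hfx
        exact (pvFind_to_scan cs u start 0 le_rfl
          ((pvVowel_iff_mem u).mpr hu) (by assumption)).2
      · simp at hfx
    simp only [pvNextVowel]
    rw [List.min?_eq_some_iff.mpr ⟨hmem, hbound⟩]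

-- scan = head of the positions ≥ start
theorem pvScan_eq_filter (cs : List Char) (start i : Int) :
    pvScan cs start i =
      match (pvPositions cs i).filter (fun x => decide (start ≤ x)) with
      | x :: _ => x
      | [] => -1 := by
  induction cs generalizing i with
  | nil => simp [pvScan, pvPositions]
  | cons c cs ih =>
    rw [pvPositions_cons]
    simp only [pvScan]
    by_cases hvc : pvVowel c
    · by_cases hs : start ≤ i
      · rw [if_pos ⟨hs, hvc⟩]
        simp [hvc, hs]
      · rw [if_neg (by tauto)]
        simp [hvc, hs, ih]
    · rw [if_neg (by tauto)]
      simp [hvc, ih]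

theorem pvPositions_lb (cs : List Char) (i : Int) : ∀ x ∈ pvPositions cs i, i ≤ x := by
  induction cs generalizing i with
  | nil => simp [pvPositions]
  | cons c cs ih =>
    rw [pvPositions_cons]
    intro x hx
    by_cases h : pvVowel c
    · rw [if_pos h] at hx
      rcases List.mem_cons.mp hx with h' | h'
      · omega
      · have := ih (i + 1) x h'; omega
    · rw [if_neg h] at hx
      have := ih (i + 1) x hx; omega

theorem pvPositions_head_lt (cs : List Char) (i p : Int) (rest : List Int)
    (h : pvPositions cs i = p :: rest) : ∀ x ∈ rest, p < x := by
  induction cs generalizing i with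
  | nil => simp [pvPositions] at h
  | cons c cs ih =>
    rw [pvPositions_cons] at h
    by_cases hv : pvVowel c
    · rw [if_pos hv] at h
      injection h with h1 h2
      subst h1; subst h2
      intro x hx
      have := pvPositions_lb cs (i + 1) x hx; omega
    · rw [if_neg hv] at h
      exact ih (i + 1) h

theorem pvPositions_shift (cs : List Char) (i : Int) :
    pvPositions cs (i + 1) = (pvPositions cs i).map (· + 1) := by
  induction cs generalizing i with
  | nil => simp [pvPositions]
  | cons c cs ih =>
    rw [pvPositions_cons, pvPositions_cons]
    by_cases h : pvVowel c <;> simp [h, ih]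

-- ===== VERDICT (by name: the statement is the Claim_ definition above) =====
theorem second_vowel_position_spec : Claim_equal_second_vowel_position := by
  intro word _
  show second_vowel_position word = second_vowel_position_alt word
  rw [second_vowel_position, second_vowel_position_alt, pvALoop_zero]
  simp only [pvNextVowel_eq_scan, pvScan_eq_filter]
  have hshift : pvPositions word.toList 1 = (pvPositions word.toList 0).map (· + 1) := by
    have h := pvPositions_shift word.toList 0
    norm_num at h
    exact h
  rw [hshift]
  have hlb := pvPositions_lb word.toList 0
  cases hpos : pvPositions word.toList 0 with
  | nil => simp
  | cons p rest =>
    have hp0 : 0 ≤ p := hlb p (hpos ▸ List.mem_cons_self ..)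
    have hrest := pvPositions_head_lt word.toList 0 p rest hpos
    have hfilter0 : (p :: rest).filter (fun x => decide ((0:Int) ≤ x)) = p :: rest := by
      apply List.filter_eq_self.mpr
      intro x hx
      have := hlb x (hpos ▸ hx)
      simpa
    rw [hfilter0]
    have hne1 : (p == (-1 : Int)) = false := by simp; omega
    have hfilter1 : (p :: rest).filter (fun x => decide (p + 1 ≤ x)) = rest := by
      simp only [List.filter_cons]
      have hnp : ¬ (p + 1 ≤ p) := by omega
      simp only [hnp, decide_false]
      apply List.filter_eq_self.mpr
      intro x hx
      have := hrest x hx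
      simp only [decide_eq_true_eq]
      omega
    simp only [hne1, Bool.false_eq_true, if_false, hfilter1]
    cases rest with
    | nil => simp
    | cons q rest' =>
      have hq : p < q := hrest q (List.mem_cons_self ..)
      have hq1 : (q != (-1 : Int)) = true := by simp; omega
      simp [hq1]
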